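-- pv_equiv track=rewrite | github.com/Yoo-SeungHyeon/TIL | 05_알고리즘/Algo_Day4/2819/solve.py | dfs
-- ===== SOURCE A (Python) =====
-- def dfs(grid, i, j, r, result, all_results):
--     if not r:
--         all_results.add(result)
--         return
--
--     # 방향 가중치 (상, 하, 좌, 우) = (x-1, x+1, y-1, y+1)
--     directions = [(-1, 0), (1, 0), (0, -1), (0, 1)]
--
--     # 4가지 경우(상하좌우) 중 조건(격자판을 벗어나는지)에 부합하면 동작
--     for di, dj in directions:
--         ni, nj = i + di, j + dj  # 이동한 좌표
--         if 0 <= ni < 4 and 0 <= nj < 4:  # 격자판 범위 확인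
--             dfs(grid, ni, nj, r - 1, result + grid[ni][nj], all_results)
--
--     return all_results
-- ===== SOURCE B (Python) =====
-- def dfs(grid, i, j, r, result, all_results):
--     # Level-by-level expansion, deduplicating (cell, partial-string) states
--     # before expanding the next level; records the final strings at the end.
--     frontier = {(i, j, result): None}
--     for _ in range(r):
--         if not frontier:
--             break
--         nxt = {}
--         for (ci, cj, s) in frontier:
--             for ni, nj in ((ci - 1, cj), (ci + 1, cj), (ci, cj - 1), (ci, cj + 1)):
--                 if 0 <= ni < 4 and 0 <= nj < 4:
--                     nxt[(ni, nj, s + grid[ni][nj])] = None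
--         frontier = nxt
--     for (_, _, s) in frontier:
--         all_results.add(s)
--     return all_results
-- ===== Notes on version B (the rewrite author's own statement) =====
-- stated objective: alternative
-- what changed: Replaces the recursive depth-first walk that mutates a shared result set with an iterative level-by-level (BFS) frontier expansion that deduplicates (cell, partial-string) states before expanding the next level, collecting the final strings in one pass at the end.
-- outside the precondition, e.g. on dfs([], 100, 100, 0, 'z', set()): A returns None, B returns {'z'}; on dfs([], 100, 100, -3, 'z', set()): A returns set(), B returns {'z'}; on dfs([['a', 'b'], ['c', 'd']], 0, 0, 1, '', set()): A returns {'b', 'c'}, B returns {'b', 'c'}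
import Mathlib
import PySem

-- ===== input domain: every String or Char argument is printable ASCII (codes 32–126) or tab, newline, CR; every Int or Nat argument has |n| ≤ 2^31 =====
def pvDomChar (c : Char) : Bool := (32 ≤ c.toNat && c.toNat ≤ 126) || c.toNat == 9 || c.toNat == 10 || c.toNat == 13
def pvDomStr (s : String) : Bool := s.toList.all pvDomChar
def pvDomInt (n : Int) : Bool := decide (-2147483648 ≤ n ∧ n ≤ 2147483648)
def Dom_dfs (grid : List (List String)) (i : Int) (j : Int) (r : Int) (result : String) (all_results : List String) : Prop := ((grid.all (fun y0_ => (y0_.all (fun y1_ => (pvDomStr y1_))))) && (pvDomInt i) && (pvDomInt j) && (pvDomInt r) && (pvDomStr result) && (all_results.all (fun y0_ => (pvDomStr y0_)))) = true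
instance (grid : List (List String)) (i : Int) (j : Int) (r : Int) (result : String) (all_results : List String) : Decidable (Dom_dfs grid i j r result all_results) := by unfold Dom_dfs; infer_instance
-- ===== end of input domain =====

-- B replaces A's recursive DFS over a shared mutable set by an iterative level-by-level
-- frontier expansion that dedups (cell, partial-string) states (objective: alternative).
-- Both Pythons mutate all_results (a set) in place with the same .add calls; the
-- equivalence proved here is about the returned value.

-- ===== PORT A =====
-- A's 'directions' constant
def dfsA_directions : List (Int × Int) := [(-1, 0), (1, 0), (0, -1), (0, 1)]

-- grid[ni][nj]: inside Pre_ the indices are always in range, so the "" default is never used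
def dfsA_cell (grid : List (List String)) (ni nj : Int) : String :=
  ((PySem.List.pyGet? grid ni).bind (fun row => PySem.List.pyGet? row nj)).getD ""

-- the recursion, with fuel = the decreasing r; at fuel 0 ('if not r') Python adds result
-- and returns None — the port returns the updated set (r = 0 is outside Pre_)
def dfsA_go (grid : List (List String)) : Nat → Int → Int → String → List String → List String
  | 0, _, _, res, acc => PySem.Set.add acc res
  | f+1, i, j, res, acc =>
    dfsA_directions.foldl
      (fun acc d =>
        if 0 ≤ i + d.1 ∧ i + d.1 < 4 ∧ 0 ≤ j + d.2 ∧ j + d.2 < 4 then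
          dfsA_go grid f (i + d.1) (j + d.2) (res ++ dfsA_cell grid (i + d.1) (j + d.2)) acc
        else acc)
      acc

-- Python diverges for r < 0 (outside Pre_); fuel r.toNat is exact for r ≥ 0
def dfs (grid : List (List String)) (i : Int) (j : Int) (r : Int) (result : String) (all_results : List String) : List String :=
  dfsA_go grid r.toNat i j result all_results

-- ===== PORT B =====
def dfsB_cell (grid : List (List String)) (ni nj : Int) : String :=
  ((PySem.List.pyGet? grid ni).bind (fun row => PySem.List.pyGet? row nj)).getD ""

-- inner two loops of one level: insert every in-range neighbour state into nxt (dict-as-set)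
def dfsB_step (grid : List (List String)) (nxt : List (Int × Int × String)) (st : Int × Int × String) : List (Int × Int × String) :=
  [(st.1 - 1, st.2.1), (st.1 + 1, st.2.1), (st.1, st.2.1 - 1), (st.1, st.2.1 + 1)].foldl
    (fun nxt p =>
      if 0 ≤ p.1 ∧ p.1 < 4 ∧ 0 ≤ p.2 ∧ p.2 < 4 then
        PySem.Set.add nxt (p.1, p.2, st.2.2 ++ dfsB_cell grid p.1 p.2)
      else nxt)
    nxt

-- 'for _ in range(r): if not frontier: break; …' — the loop runs at most r.toNat times
-- (range(r) is empty for r ≤ 0) and stops early on an empty frontier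
def dfsB_loop (grid : List (List String)) : Nat → List (Int × Int × String) → List (Int × Int × String)
  | 0, f => f
  | n+1, f => if f = [] then f else dfsB_loop grid n (f.foldl (dfsB_step grid) [])

def dfs_alt (grid : List (List String)) (i : Int) (j : Int) (r : Int) (result : String) (all_results : List String) : List String :=
  -- frontier = {(i, j, result): None}; run the loop; record the final frontier's strings
  ((dfsB_loop grid r.toNat [(i, j, result)]).foldl
    (fun acc st => PySem.Set.add acc st.2.2) all_results)

-- ===== PRECONDITION & SPEC =====
-- true iff some first step from (i, j) lands on the 4×4 board
def pvNbrInGrid (i j : Int) : Bool :=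
  (decide (0 ≤ i - 1) && decide (i - 1 < 4) && decide (0 ≤ j) && decide (j < 4)) ||
  (decide (0 ≤ i + 1) && decide (i + 1 < 4) && decide (0 ≤ j) && decide (j < 4)) ||
  (decide (0 ≤ i) && decide (i < 4) && decide (0 ≤ j - 1) && decide (j - 1 < 4)) ||
  (decide (0 ≤ i) && decide (i < 4) && decide (0 ≤ j + 1) && decide (j + 1 < 4))

-- Pre_ keeps the natural domain: r ≥ 1 (at r = 0 A returns None, not a set; for r < 0 the
-- Python recursion diverges whenever a first step exists, and otherwise returns without
-- recording result), and — slightly narrower than strictly needed — a full 4×4 grid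
-- whenever a first step lands on the board, even if the particular walk would stay on cells
-- that exist (Python would raise IndexError only on a missing visited cell).
def Pre_dfs (grid : List (List String)) (i : Int) (j : Int) (r : Int) (result : String) (all_results : List String) : Prop :=
  1 ≤ r ∧ (pvNbrInGrid i j = true → (4 ≤ grid.length ∧ ∀ row ∈ grid.take 4, 4 ≤ row.length))
instance (grid : List (List String)) (i : Int) (j : Int) (r : Int) (result : String) (all_results : List String) : Decidable (Pre_dfs grid i j r result all_results) := by unfold Pre_dfs; infer_instance

def pvWitness_dfs : List (List String) × Int × Int × Int × String × List String :=
  ([["a", "b", "c", "d"], ["e", "f", "g", "h"], ["i", "j", "k", "l"], ["m", "n", "o", "p"]],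
   0, 0, 2, "", [])

def Spec_dfs (grid : List (List String)) (i : Int) (j : Int) (r : Int) (result : String) (all_results : List String) (out : List String) : Prop := out = dfs_alt grid i j r result all_results
instance (grid : List (List String)) (i : Int) (j : Int) (r : Int) (result : String) (all_results : List String) (out : List String) : Decidable (Spec_dfs grid i j r result all_results out) := by unfold Spec_dfs; infer_instance

-- ===== CLAIM (what is proved, stated in full; the proofs are below) =====
def Claim_equal_dfs : Prop := ∀ (grid : List (List String)) (i : Int) (j : Int) (r : Int) (result : String) (all_results : List String), Dom_dfs grid i j r result all_results → Pre_dfs grid i j r result all_results → Spec_dfs grid i j r result all_results (dfs grid i j r result all_results)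

-- ===== LEMMAS AND PROOFS =====

-- the in-range children of a state, in direction order
def pvStep (grid : List (List String)) (st : Int × Int × String) : List (Int × Int × String) :=
  dfsA_directions.filterMap (fun d =>
    if 0 ≤ st.1 + d.1 ∧ st.1 + d.1 < 4 ∧ 0 ≤ st.2.1 + d.2 ∧ st.2.1 + d.2 < 4 then
      some (st.1 + d.1, st.2.1 + d.2, st.2.2 ++ dfsA_cell grid (st.1 + d.1) (st.2.1 + d.2))
    else none)

-- the strings at the leaves of A's depth-f walk tree from st, in A's visit order
def pvLeaves (grid : List (List String)) : Nat → (Int × Int × String) → List String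
  | 0, st => [st.2.2]
  | f+1, st => (pvStep grid st).flatMap (pvLeaves grid f)

-- B's outer loop as a fuel recursion
def pvIter (grid : List (List String)) : Nat → List (Int × Int × String) → List (Int × Int × String)
  | 0, f => f
  | n+1, f => pvIter grid n (f.foldl (dfsB_step grid) [])

theorem pv_foldl_add_of_subset {α : Type} [BEq α] [LawfulBEq α] (l acc : List α)
    (h : ∀ y ∈ l, y ∈ acc) : l.foldl PySem.Set.add acc = acc := by
  induction l with
  | nil => rfl
  | cons x l ih =>
      simp only [List.foldl_cons]
      rw [PySem.Set.add_of_mem (h x (by simp))]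
      exact ih (fun y hy => h y (by simp [hy]))

theorem pv_mem_foldl_add {α : Type} [BEq α] [LawfulBEq α] {x : α} (l : List α) (acc : List α)
    (h : x ∈ acc ∨ x ∈ l) : x ∈ l.foldl PySem.Set.add acc := by
  induction l generalizing acc with
  | nil => simpa using h
  | cons y l ih =>
      simp only [List.foldl_cons]
      rcases h with h | h
      · exact ih _ (Or.inl (by simp [PySem.Set.mem_add, h]))
      · rcases List.mem_cons.mp h with rfl | h
        · exact ih _ (Or.inl (by simp [PySem.Set.mem_add]))
        · exact ih _ (Or.inr h)

-- deduping the states before flatMapping does not change the accumulated set (as a list)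
theorem pv_foldl_add_flatMap_foldl_add {α β : Type} [BEq α] [LawfulBEq α] [BEq β] [LawfulBEq β]
    (g : α → List β) (f seen : List α) (acc : List β) :
    ((f.foldl PySem.Set.add seen).flatMap g).foldl PySem.Set.add acc
      = (f.flatMap g).foldl PySem.Set.add ((seen.flatMap g).foldl PySem.Set.add acc) := by
  induction f generalizing seen acc with
  | nil => simp
  | cons x f ih =>
      simp only [List.foldl_cons, List.flatMap_cons, List.foldl_append]
      rw [ih]
      congr 1
      by_cases hx : x ∈ seen
      · rw [PySem.Set.add_of_mem hx]
        refine (pv_foldl_add_of_subset _ _ ?_).symm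
        intro y hy
        exact pv_mem_foldl_add _ _ (Or.inr (List.mem_flatMap.mpr ⟨x, hx, hy⟩))
      · rw [PySem.Set.add_of_not_mem hx]
        simp [List.foldl_append]

theorem pv_foldl_add_flatMap_ofList {α β : Type} [BEq α] [LawfulBEq α] [BEq β] [LawfulBEq β]
    (g : α → List β) (l : List α) (acc : List β) :
    ((l.foldl PySem.Set.add ([] : List α)).flatMap g).foldl PySem.Set.add acc
      = (l.flatMap g).foldl PySem.Set.add acc := by
  rw [pv_foldl_add_flatMap_foldl_add g l [] acc]; rfl

-- A's loop body over any direction list accumulates the leaves of the surviving children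
theorem pv_dfsA_dirs (grid : List (List String)) (f : Nat)
    (hf : ∀ (i j : Int) (res : String) (acc : List String),
        dfsA_go grid f i j res acc = (pvLeaves grid f (i, j, res)).foldl PySem.Set.add acc)
    (dirs : List (Int × Int)) (i j : Int) (res : String) (acc : List String) :
    dirs.foldl
      (fun acc d =>
        if 0 ≤ i + d.1 ∧ i + d.1 < 4 ∧ 0 ≤ j + d.2 ∧ j + d.2 < 4 then
          dfsA_go grid f (i + d.1) (j + d.2) (res ++ dfsA_cell grid (i + d.1) (j + d.2)) acc
        else acc)
      acc
    = ((dirs.filterMap (fun d =>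
          if 0 ≤ i + d.1 ∧ i + d.1 < 4 ∧ 0 ≤ j + d.2 ∧ j + d.2 < 4 then
            some (i + d.1, j + d.2, res ++ dfsA_cell grid (i + d.1) (j + d.2))
          else none)).flatMap (pvLeaves grid f)).foldl PySem.Set.add acc := by
  induction dirs generalizing acc with
  | nil => rfl
  | cons d dirs ih =>
      simp only [List.foldl_cons, List.filterMap_cons]
      by_cases hc : 0 ≤ i + d.1 ∧ i + d.1 < 4 ∧ 0 ≤ j + d.2 ∧ j + d.2 < 4
      · simp only [if_pos hc, List.flatMap_cons, List.foldl_append]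
        rw [hf, ih]
      · simp only [if_neg hc]
        exact ih acc

theorem pv_dfsA_go_eq (grid : List (List String)) (f : Nat) (i j : Int) (res : String)
    (acc : List String) :
    dfsA_go grid f i j res acc = (pvLeaves grid f (i, j, res)).foldl PySem.Set.add acc := by
  induction f generalizing i j res acc with
  | zero => rfl
  | succ f ih =>
      rw [pvLeaves]
      show dfsA_directions.foldl _ acc = _
      rw [pv_dfsA_dirs grid f ih dfsA_directions i j res acc]
      rfl

theorem pv_dfsB_step_eq (grid : List (List String)) (nxt : List (Int × Int × String))
    (st : Int × Int × String) :
    dfsB_step grid nxt st = (pvStep grid st).foldl PySem.Set.add nxt := by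
  obtain ⟨ci, cj, s⟩ := st
  simp only [dfsB_step, pvStep, dfsA_directions, dfsA_cell, dfsB_cell,
    List.filterMap_cons, List.filterMap_nil, List.foldl_cons, List.foldl_nil]
  norm_num [sub_eq_add_neg]
  split_ifs <;> simp [List.foldl]

theorem pv_level_eq (grid : List (List String)) (f : List (Int × Int × String))
    (nxt0 : List (Int × Int × String)) :
    f.foldl (dfsB_step grid) nxt0 = (f.flatMap (pvStep grid)).foldl PySem.Set.add nxt0 := by
  induction f generalizing nxt0 with
  | nil => rfl
  | cons st f ih =>
      simp only [List.foldl_cons, List.flatMap_cons, List.foldl_append]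
      rw [pv_dfsB_step_eq, ih]

theorem pv_iter_nil (grid : List (List String)) (n : Nat) :
    pvIter grid n [] = [] := by
  induction n with
  | zero => rfl
  | succ n ih => rw [pvIter]; exact ih

theorem pv_loop_eq_iter (grid : List (List String)) (n : Nat)
    (f : List (Int × Int × String)) :
    dfsB_loop grid n f = pvIter grid n f := by
  induction n generalizing f with
  | zero => rfl
  | succ n ih =>
      rw [dfsB_loop, pvIter]
      by_cases hf : f = []
      · subst hf; rw [if_pos rfl, List.foldl_nil, pv_iter_nil]
      · rw [if_neg hf]; exact ih _

theorem pv_iter_leaves (grid : List (List String)) (n : Nat)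
    (f : List (Int × Int × String)) (acc : List String) :
    (pvIter grid n f).foldl (fun acc st => PySem.Set.add acc st.2.2) acc
      = (f.flatMap (pvLeaves grid n)).foldl PySem.Set.add acc := by
  induction n generalizing f acc with
  | zero =>
      simp only [pvIter]
      induction f generalizing acc with
      | nil => rfl
      | cons a t iht =>
          simp only [List.foldl_cons, List.flatMap_cons, pvLeaves, List.foldl_append,
            List.foldl_nil]
          exact iht _
  | succ n ih =>
      rw [pvIter, ih]
      rw [pv_level_eq, pv_foldl_add_flatMap_ofList (pvLeaves grid n) (f.flatMap (pvStep grid)) acc]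
      rw [List.flatMap_assoc]
      rfl

-- ===== VERDICT (by name: the statement is the Claim_ definition above) =====
theorem dfs_spec : Claim_equal_dfs := by
  intro grid i j r result all_results _ _
  unfold Spec_dfs dfs dfs_alt
  rw [pv_dfsA_go_eq, pv_loop_eq_iter, pv_iter_leaves]
  simp
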